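-- pv_equiv track=rewrite | github.com/whyvineet/cp-solutions | Codeforces/1610B. Kalindrome Array/Solution.py | solve
-- ===== SOURCE A (Python) =====
-- def solve(l, r, array, remove):
--
--     while l <= r:
--         if array[l] == array[r]:
--             l += 1
--             r -= 1
--         elif array[l] == remove:
--             l += 1
--         elif array[r] == remove:
--             r -= 1
--         else:
--             return False
--
--     return True
-- ===== SOURCE B (Python) =====
-- def solve(l, r, array, remove):
--     sub = [array[i] for i in range(l, r + 1) if array[i] != remove]
--     return sub == sub[::-1]
-- ===== Notes on version B (the rewrite author's own statement) =====
-- stated objective: idiomatic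
-- what changed: Replaces A's in-place two-pointer loop with skip branches by a single filtering pass (drop the removed value from array[l..r]) followed by a reversed-equality palindrome comparison.
import Mathlib
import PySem

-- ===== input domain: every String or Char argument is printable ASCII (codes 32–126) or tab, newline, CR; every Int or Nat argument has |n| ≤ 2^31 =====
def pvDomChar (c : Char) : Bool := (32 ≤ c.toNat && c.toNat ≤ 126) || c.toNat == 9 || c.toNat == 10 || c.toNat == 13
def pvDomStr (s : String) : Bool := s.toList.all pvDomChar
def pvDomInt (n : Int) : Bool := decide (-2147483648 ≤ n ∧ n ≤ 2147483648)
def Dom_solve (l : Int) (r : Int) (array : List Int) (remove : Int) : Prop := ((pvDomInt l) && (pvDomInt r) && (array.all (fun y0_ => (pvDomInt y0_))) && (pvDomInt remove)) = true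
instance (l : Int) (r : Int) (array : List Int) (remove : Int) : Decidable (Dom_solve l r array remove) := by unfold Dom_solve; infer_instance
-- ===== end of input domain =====

-- B replaces A's in-place two-pointer-with-skip loop by one filtering pass (drop `remove`
-- in the slice) followed by a reversed-equality palindrome test; objective: idiomatic.

-- ===== PORT A =====
-- literal transliteration of A's while-loop; the `| _, _ => false` arm is the IndexError
-- case (pyGet? = none), which Pre_solve excludes.
def solve (l : Int) (r : Int) (array : List Int) (remove : Int) : Bool :=
  if h : l ≤ r then
    match PySem.List.pyGet? array l, PySem.List.pyGet? array r with
    | some a, some b =>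
      if a = b then solve (l + 1) (r - 1) array remove
      else if a = remove then solve (l + 1) r array remove
      else if b = remove then solve l (r - 1) array remove
      else false
    | _, _ => false
  else true
termination_by (r + 1 - l).toNat
decreasing_by all_goals omega

-- ===== PORT B =====
-- the comprehension `[array[i] for i in range(l, r + 1) if array[i] != remove]`
-- (the `none` case of pyGet? is the IndexError, excluded by Pre_solve)
def pvFilt (l : Int) (r : Int) (array : List Int) (remove : Int) : List Int :=
  (PySem.List.pyRange l (r + 1) 1).filterMap (fun i =>
    match PySem.List.pyGet? array i with
    | some x => if x ≠ remove then some x else none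
    | none => none)

def solve_alt (l : Int) (r : Int) (array : List Int) (remove : Int) : Bool :=
  let sub := pvFilt l r array remove
  sub == sub.reverse

-- ===== PRECONDITION & SPEC =====
-- Pre_ excludes exactly the inputs where A raises IndexError: a nonempty range l..r with an
-- endpoint outside Python's valid index range (both A and B raise there).
def Pre_solve (l : Int) (r : Int) (array : List Int) (remove : Int) : Prop :=
  l ≤ r → (PySem.Raise.InRange array.length l ∧ PySem.Raise.InRange array.length r)
instance (l : Int) (r : Int) (array : List Int) (remove : Int) : Decidable (Pre_solve l r array remove) := by unfold Pre_solve; infer_instance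

def pvWitness_solve : Int × Int × List Int × Int := (0, 3, [1, 2, 2, 1], 2)

def Spec_solve (l : Int) (r : Int) (array : List Int) (remove : Int) (out : Bool) : Prop := out = solve_alt l r array remove
instance (l : Int) (r : Int) (array : List Int) (remove : Int) (out : Bool) : Decidable (Spec_solve l r array remove out) := by unfold Spec_solve; infer_instance

-- ===== CLAIM (what is proved, stated in full; the proofs are below) =====
def Claim_equal_solve : Prop := ∀ (l : Int) (r : Int) (array : List Int) (remove : Int), Dom_solve l r array remove → Pre_solve l r array remove → Spec_solve l r array remove (solve l r array remove)

-- ===== LEMMAS AND PROOFS =====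

-- the element-keeping step of B's comprehension
def pvKeep (array : List Int) (remove : Int) (i : Int) : Option Int :=
  match PySem.List.pyGet? array i with
  | some x => if x ≠ remove then some x else none
  | none => none

theorem pvFilt_eq (l r : Int) (array : List Int) (remove : Int) :
    pvFilt l r array remove = (PySem.List.pyRange l (r + 1) 1).filterMap (pvKeep array remove) := rfl

theorem pvFilt_nil (l r : Int) (array : List Int) (remove : Int) (h : r < l) :
    pvFilt l r array remove = [] := by
  rw [pvFilt_eq, PySem.List.pyRange_one_eq_nil (by omega)]; rfl

theorem pvFilt_cons (l r : Int) (array : List Int) (remove : Int) (h : l ≤ r) :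
    pvFilt l r array remove
      = (pvKeep array remove l).toList ++ pvFilt (l + 1) r array remove := by
  rw [pvFilt_eq, pvFilt_eq, PySem.List.pyRange_one_cons (by omega), List.filterMap_cons]
  cases pvKeep array remove l <;> simp

theorem pvFilt_snoc (l r : Int) (array : List Int) (remove : Int) (h : l ≤ r) :
    pvFilt l r array remove
      = pvFilt l (r - 1) array remove ++ (pvKeep array remove r).toList := by
  rw [pvFilt_eq, pvFilt_eq,
    show r + 1 = (r - 1 + 1) + 1 by ring,
    PySem.List.pyRange_one_succ_right (by omega), List.filterMap_append,
    show r - 1 + 1 = r by ring]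
  cases hk : pvKeep array remove r <;> simp [hk]

-- palindromeness of x :: m ++ [y]
theorem pal_wrap (x : Int) (m : List Int) :
    ((x :: m ++ [x]) == (x :: m ++ [x]).reverse) = (m == m.reverse) := by
  simp [List.reverse_cons]

theorem pal_ends_ne (x y : Int) (m : List Int) (h : x ≠ y) :
    ((x :: m ++ [y]) == (x :: m ++ [y]).reverse) = false := by
  simp [List.reverse_cons]
  intro hx; omega

theorem main_lemma (array : List Int) (remove : Int) :
    ∀ (fuel : Nat) (l r : Int), (r + 1 - l).toNat ≤ fuel →
      Pre_solve l r array remove →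
      solve l r array remove = solve_alt l r array remove := by
  intro fuel
  induction fuel with
  | zero =>
    intro l r hf hpre
    have hlr : r < l := by omega
    rw [solve]
    simp only [solve_alt, pvFilt_nil l r array remove hlr]
    simp [(show ¬ l ≤ r by omega)]
  | succ n ih =>
    intro l r hf hpre
    by_cases hlr : l ≤ r
    · obtain ⟨hl, hr⟩ := hpre hlr
      obtain ⟨a, ha⟩ : ∃ a, PySem.List.pyGet? array l = some a := by
        cases h : PySem.List.pyGet? array l with
        | none => exact absurd ((PySem.List.pyGet?_eq_none_iff array l).mp h) (by simp [hl])
        | some a => exact ⟨a, rfl⟩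
      obtain ⟨b, hb⟩ : ∃ b, PySem.List.pyGet? array r = some b := by
        cases h : PySem.List.pyGet? array r with
        | none => exact absurd ((PySem.List.pyGet?_eq_none_iff array r).mp h) (by simp [hr])
        | some b => exact ⟨b, rfl⟩
      have hInR : ∀ l' r' : Int, l ≤ l' → r' ≤ r → Pre_solve l' r' array remove := by
        intro l' r' h1 h2 h3
        constructor <;> constructor <;>
          first
          | exact le_trans hl.1 (by omega)
          | exact lt_of_le_of_lt (by omega) hr.2
          | omega
      rw [solve]
      simp only [hlr, dif_pos, ha, hb]
      by_cases hab : a = b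
      · -- matched ends: recurse on (l+1, r-1)
        have hrec := ih (l + 1) (r - 1) (by omega) (hInR _ _ (by omega) (by omega))
        simp only [if_pos hab, hrec]
        by_cases heq : l = r
        · -- single element: inner range empty, outer is [a] or []
          subst heq
          have h0 : pvFilt (l + 1) (l - 1) array remove = [] := pvFilt_nil _ _ _ _ (by omega)
          have h1 : pvFilt l l array remove = (pvKeep array remove l).toList := by
            rw [pvFilt_cons l l array remove le_rfl, pvFilt_nil (l+1) l array remove (by omega)]
            simp
          simp only [solve_alt, h0, h1, pvKeep, ha]
          split_ifs <;> simp
        · -- l < r: peel both ends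
          have hlt : l < r := lt_of_le_of_ne hlr heq
          have hdec : pvFilt l r array remove
              = (pvKeep array remove l).toList ++ (pvFilt (l+1) (r-1) array remove
                  ++ (pvKeep array remove r).toList) := by
            rw [pvFilt_cons l r array remove hlr, pvFilt_snoc (l+1) r array remove (by omega)]
          subst hab
          simp only [solve_alt, hdec, pvKeep, ha, hb]
          by_cases hrm : a = remove
          · simp [hrm]
          · simp only [ne_eq, hrm, not_false_eq_true, if_pos, Option.toList_some]
            simpa using pal_wrap a (pvFilt (l+1) (r-1) array remove)
      · simp only [if_neg hab]
        by_cases harm : a = remove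
        · -- skip left
          have hrec := ih (l + 1) r (by omega) (hInR _ _ (by omega) le_rfl)
          have hdec := pvFilt_cons l r array remove hlr
          simp only [hrec, solve_alt, hdec, pvKeep, ha, harm]
          simp
        · by_cases hbrm : b = remove
          · -- skip right
            have hrec := ih l (r - 1) (by omega) (hInR _ _ le_rfl (by omega))
            have hdec := pvFilt_snoc l r array remove hlr
            simp only [if_neg harm, hrec, solve_alt, hdec, pvKeep, hb, hbrm]
            simp
          · -- mismatch: both sides false
            have hlt : l < r := by
              rcases lt_or_eq_of_le hlr with h | h
              · exact h
              · exact absurd (by rw [h] at ha; rw [ha] at hb; exact Option.some.inj hb) hab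
            have hdec : pvFilt l r array remove
                = a :: (pvFilt (l+1) (r-1) array remove ++ [b]) := by
              rw [pvFilt_cons l r array remove hlr, pvFilt_snoc (l+1) r array remove (by omega)]
              simp [pvKeep, ha, hb, harm, hbrm]
            simp only [if_neg harm, if_neg hbrm, solve_alt, hdec]
            simpa using pal_ends_ne a b (pvFilt (l+1) (r-1) array remove) hab
    · rw [solve]
      simp only [solve_alt, pvFilt_nil l r array remove (by omega)]
      simp [hlr]

-- ===== VERDICT (by name: the statement is the Claim_ definition above) =====
theorem solve_spec : Claim_equal_solve := by
  intro l r array remove _ hpre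
  unfold Spec_solve
  exact main_lemma array remove (r + 1 - l).toNat l r le_rfl hpre
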